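-- pv_equiv track=rewrite | github.com/nnim99/Introduction-to-Programming-Python- | Assignment3/asg3.Nimra/NMStringProcessor.py | isspace
-- ===== SOURCE A (Python) =====
-- def length(string):
-- 	length01 = 0
-- 	for var in string:
-- 		length01 += 1
-- 	return length01
--
-- def isspace(string):
-- 	index = -1
-- 	space = " "
-- 	length01 = length(string)
-- 	flag = 1
-- 	for i in range(length01):
-- 		word = string [i]
-- 		if word in space:
-- 			flag *= 1
-- 		else:
-- 			flag *= 0
-- 	if flag == 1:
-- 		return 	True
-- 	else:
-- 		return False
-- ===== SOURCE B (Python) =====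
-- def isspace(string):
--     return set(string) <= {" "}
-- ===== Notes on version B (the rewrite author's own statement) =====
-- stated objective: idiomatic
-- what changed: Replaces the index loop with its hand-rolled length() and multiplicative flag by building the set of distinct characters and doing one subset test against the singleton space set.
import Mathlib
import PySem

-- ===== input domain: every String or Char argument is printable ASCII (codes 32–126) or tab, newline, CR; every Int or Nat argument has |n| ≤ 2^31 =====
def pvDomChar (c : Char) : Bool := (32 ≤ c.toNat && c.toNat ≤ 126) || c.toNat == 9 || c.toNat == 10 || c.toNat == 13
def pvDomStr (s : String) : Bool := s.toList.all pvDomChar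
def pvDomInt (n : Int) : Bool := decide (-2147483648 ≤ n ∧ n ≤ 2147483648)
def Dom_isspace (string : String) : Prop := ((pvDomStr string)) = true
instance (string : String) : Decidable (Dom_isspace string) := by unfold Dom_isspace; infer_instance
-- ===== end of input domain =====

-- B replaces A's index loop (with its hand-rolled length() and 0/1 multiplicative flag)
-- by one subset test of the string's distinct-character set against {' '} (idiomatic).

-- ===== PORT A =====
-- 'word in space' with space = " " and word a single character is membership of that character in " ".
def isspace (string : String) : Bool :=
  let space : List Char := " ".toList
  let length01 : Int := string.toList.foldl (fun n _ => n + 1) (0 : Int)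
  let flag : Int :=
    (PySem.List.pyRange 0 length01 1).foldl
      (fun flag i =>
        let word := PySem.List.pyGetD string.toList i ' '
        if word ∈ space then flag * 1 else flag * 0) 1
  if flag = 1 then true else false

-- ===== PORT B =====
def isspace_alt (string : String) : Bool :=
  PySem.Set.issubset (PySem.Set.ofList string.toList) (PySem.Set.ofList [' '])

-- ===== PRECONDITION & SPEC =====
def Spec_isspace (string : String) (out : Bool) : Prop := out = isspace_alt string
instance (string : String) (out : Bool) : Decidable (Spec_isspace string out) := by unfold Spec_isspace; infer_instance

-- ===== CLAIM (what is proved, stated in full; the proofs are below) =====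
def Claim_equal_isspace : Prop := ∀ (string : String), Dom_isspace string → Spec_isspace string (isspace string)

-- ===== LEMMAS AND PROOFS =====

theorem pv_len_foldl (l : List Char) (n : Int) :
    l.foldl (fun n _ => n + 1) n = n + l.length := by
  induction l generalizing n with
  | nil => simp
  | cons c t ih => simp [List.foldl, ih]; ring

theorem pv_foldl_zero (l : List Char) :
    l.foldl (fun flag c => if c = ' ' then flag * 1 else flag * 0) (0 : Int) = 0 := by
  induction l with
  | nil => rfl
  | cons c t ih =>
    rw [List.foldl_cons]
    have h0 : (if c = ' ' then (0 : Int) * 1 else 0 * 0) = 0 := by split_ifs <;> ring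
    rw [h0]; exact ih

theorem pv_foldl_flag (l : List Char) :
    l.foldl (fun flag c => if c = ' ' then flag * 1 else flag * 0) (1 : Int)
      = (if ∀ c ∈ l, c = ' ' then 1 else 0) := by
  induction l with
  | nil => simp
  | cons c t ih =>
    rw [List.foldl_cons]
    by_cases h : c = ' '
    · have h1 : (if c = ' ' then (1 : Int) * 1 else 1 * 0) = 1 := by rw [if_pos h]; ring
      rw [h1, ih]
      simp [h]
    · have h1 : (if c = ' ' then (1 : Int) * 1 else 1 * 0) = 0 := by rw [if_neg h]; ring
      rw [h1, pv_foldl_zero]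
      have : ¬ ∀ x ∈ c :: t, x = ' ' := fun hc => h (hc c (by simp))
      rw [if_neg this]

-- ===== VERDICT (by name: the statement is the Claim_ definition above) =====
theorem isspace_spec : Claim_equal_isspace := by
  intro s _
  show isspace s = isspace_alt s
  rw [Bool.eq_iff_iff]
  unfold isspace isspace_alt
  simp only [pv_len_foldl, Int.zero_add, show " ".toList = [' '] from rfl,
    List.mem_singleton]
  have hfold := PySem.List.foldl_pyRange_pyGetD (xs := s.toList) (d := ' ')
      (f := fun flag c => if c = ' ' then flag * 1 else flag * 0) (init := (1 : Int))
      (le_refl 0)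
  simp only [PySem.List.len] at hfold
  rw [hfold]
  simp only [Int.toNat_zero, List.drop_zero, pv_foldl_flag]
  constructor
  · intro h
    by_cases hall : ∀ c ∈ s.toList, c = ' '
    · rw [PySem.Set.issubset_iff]
      intro x hx
      simp [PySem.Set.mem_ofList] at hx ⊢
      exact hall x hx
    · rw [if_neg hall] at h
      simp at h
  · intro h
    rw [PySem.Set.issubset_iff] at h
    have hall : ∀ c ∈ s.toList, c = ' ' := by
      intro c hc
      have := h c (by simp [PySem.Set.mem_ofList, hc])
      simpa [PySem.Set.mem_ofList] using this
    rw [if_pos hall]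
    simp
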